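-- pv_equiv track=rewrite | github.com/Lantianqianmu/TAI-seq | Pipeline/split_round1.py | split_reference_barcode_provided
-- ===== SOURCE A (Python) =====
-- def split_reference_barcode_provided(reference: list, sublib: list) -> list:
--     ref_used = reference.copy()
--     number_of_split = len(sublib)
--     groups = []
--     for i in range(number_of_split):
--         groups.append(ref_used[:sublib[i]*8])
--         del ref_used[:sublib[i]*8]
--     return groups
-- ===== SOURCE B (Python) =====
-- def split_reference_barcode_provided(reference: list, sublib: list) -> list:
--     if not sublib:
--         return []
--     k = sublib[0] * 8
--     return [reference[:k]] + split_reference_barcode_provided(reference[k:], sublib[1:])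
-- ===== Notes on version B (the rewrite author's own statement) =====
-- stated objective: simpler
-- what changed: Replaces the index-loop that slices and destructively deletes from a mutated copy with a pure structural recursion over sublib that peels one group off via slicing; no copy, no mutation, no index arithmetic.
import Mathlib
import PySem

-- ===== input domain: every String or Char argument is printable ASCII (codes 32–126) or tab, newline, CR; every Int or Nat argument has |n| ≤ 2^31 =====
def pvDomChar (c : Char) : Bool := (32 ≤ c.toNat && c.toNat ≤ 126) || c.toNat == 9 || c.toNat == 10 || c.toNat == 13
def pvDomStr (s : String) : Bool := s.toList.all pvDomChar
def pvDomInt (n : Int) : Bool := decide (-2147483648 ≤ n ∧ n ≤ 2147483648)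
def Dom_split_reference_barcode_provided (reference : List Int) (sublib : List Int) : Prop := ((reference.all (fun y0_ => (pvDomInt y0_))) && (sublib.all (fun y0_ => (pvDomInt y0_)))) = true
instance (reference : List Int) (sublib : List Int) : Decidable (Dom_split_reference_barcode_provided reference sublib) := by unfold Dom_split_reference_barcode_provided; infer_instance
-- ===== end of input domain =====

-- B replaces A's slice-and-delete loop over a mutated copy with a pure structural recursion
-- over sublib (simpler: no copy, no mutation, no index arithmetic); same return value everywhere.

-- ===== PORT A =====
-- for i in range(len(sublib)): groups.append(ref_used[:sublib[i]*8]); del ref_used[:sublib[i]*8]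
-- state = (ref_used, groups); del ref_used[:k] leaves exactly ref_used[k:] (the same clamped cut point).
def split_reference_barcode_provided (reference : List Int) (sublib : List Int) : List (List Int) :=
  let ref_used := reference
  let number_of_split : Int := sublib.length
  let st := (PySem.List.pyRange 0 number_of_split 1).foldl
    (fun (st : List Int × List (List Int)) i =>
      let k := PySem.List.pyGetD sublib i 0 * 8
      (PySem.List.slice st.1 (some k) none, st.2 ++ [PySem.List.slice st.1 none (some k)]))
    (ref_used, [])
  st.2

-- ===== PORT B =====
-- if not sublib: return []; k = sublib[0]*8; return [reference[:k]] + f(reference[k:], sublib[1:])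
def split_reference_barcode_provided_alt (reference : List Int) (sublib : List Int) : List (List Int) :=
  match sublib with
  | [] => []
  | s :: rest =>
    let k := s * 8
    PySem.List.slice reference none (some k) ::
      split_reference_barcode_provided_alt (PySem.List.slice reference (some k) none) rest

-- ===== PRECONDITION & SPEC =====
def Spec_split_reference_barcode_provided (reference : List Int) (sublib : List Int) (out : List (List Int)) : Prop := out = split_reference_barcode_provided_alt reference sublib
instance (reference : List Int) (sublib : List Int) (out : List (List Int)) : Decidable (Spec_split_reference_barcode_provided reference sublib out) := by unfold Spec_split_reference_barcode_provided; infer_instance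

-- ===== CLAIM (what is proved, stated in full; the proofs are below) =====
def Claim_equal_split_reference_barcode_provided : Prop := ∀ (reference : List Int) (sublib : List Int), Dom_split_reference_barcode_provided reference sublib → Spec_split_reference_barcode_provided reference sublib (split_reference_barcode_provided reference sublib)

-- ===== LEMMAS AND PROOFS =====

-- A's loop body, named for the proofs
def pvBodyA (sublib : List Int) (st : List Int × List (List Int)) (i : Int) :
    List Int × List (List Int) :=
  let k := PySem.List.pyGetD sublib i 0 * 8
  (PySem.List.slice st.1 (some k) none, st.2 ++ [PySem.List.slice st.1 none (some k)])

-- Loop invariant: folding the indices j..len over A's body appends B's result on (ref, drop j sublib).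
theorem pvLoopA (sublib : List Int) :
    ∀ (m j : Nat), j + m = sublib.length →
      ∀ (ref : List Int) (g : List (List Int)),
        ((PySem.List.pyRange (j : Int) (sublib.length : Int) 1).foldl (pvBodyA sublib) (ref, g)).2
          = g ++ split_reference_barcode_provided_alt ref (sublib.drop j) := by
  intro m
  induction m with
  | zero =>
    intro j h ref g
    rw [show PySem.List.pyRange (j : Int) (sublib.length : Int) 1 = [] from
      PySem.List.pyRange_one_eq_nil (by omega), List.drop_eq_nil_of_le (by omega)]
    simp [split_reference_barcode_provided_alt]
  | succ m ih =>
    intro j h ref g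
    have hj : j < sublib.length := by omega
    rw [PySem.List.pyRange_one_cons (by exact_mod_cast hj)]
    simp only [List.foldl_cons]
    have h1 : ((j : Int) + 1) = (((j + 1 : Nat)) : Int) := by push_cast; ring
    rw [show pvBodyA sublib (ref, g) (j : Int)
          = (PySem.List.slice ref (some (sublib[j] * 8)) none,
             g ++ [PySem.List.slice ref none (some (sublib[j] * 8))]) by
      simp [pvBodyA, PySem.List.pyGetD_natCast, List.getD_eq_getElem?_getD,
        List.getElem?_eq_getElem hj], h1, ih (j + 1) (by omega)]
    rw [List.drop_eq_getElem_cons hj]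
    simp [split_reference_barcode_provided_alt]

-- ===== VERDICT (by name: the statement is the Claim_ definition above) =====
theorem split_reference_barcode_provided_spec : Claim_equal_split_reference_barcode_provided := by
  intro reference sublib _
  unfold Spec_split_reference_barcode_provided split_reference_barcode_provided
  have := pvLoopA sublib sublib.length 0 (by omega) reference []
  simpa using this
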